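-- pv_equiv track=rewrite | github.com/MetaMind/Open_Data_Platform | odep/metamind/metamind/core/memo/dpccp.py | _enumerate_ccp
-- ===== SOURCE A (Python) =====
-- def _enumerate_ccp(subset: int) -> list[tuple[int, int]]:
--     """Enumerate all valid complementary partition pairs (S1, S2)."""
--     pairs: list[tuple[int, int]] = []
--     # Iterate over all non-empty proper subsets
--     s = subset
--     sub = (s - 1) & s
--     while sub > 0:
--         complement = subset ^ sub
--         if complement > 0 and sub < complement:  # avoid duplicates
--             pairs.append((sub, complement))
--         sub = (sub - 1) & s
--     return pairs
-- ===== SOURCE B (Python) =====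
-- def _enumerate_ccp(subset: int) -> list[tuple[int, int]]:
--     """Enumerate all valid complementary partition pairs (S1, S2)."""
--     # collect the set-bit values of subset, in ascending order
--     bits = []
--     v = 1
--     while v <= subset:
--         if subset & v:
--             bits.append(v)
--         v <<= 1
--
--     def gen(bs):
--         # all submasks over the given bit values, in decreasing numeric order
--         if not bs:
--             return [0]
--         rest = gen(bs[1:])
--         return [bs[0] + t for t in rest] + rest
--
--     pairs = []
--     for sub in gen(bits[::-1]):
--         comp = subset ^ sub
--         if 0 < sub < comp:
--             pairs.append((sub, comp))
--     return pairs
-- ===== Notes on version B (the rewrite author's own statement) =====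
-- stated objective: alternative
-- what changed: Replaces A's (sub-1)&s decrement walk over submasks with an explicit table of set-bit values plus a recursive generator that enumerates all submasks in the same decreasing order, then filters the pairs.
import Mathlib
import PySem

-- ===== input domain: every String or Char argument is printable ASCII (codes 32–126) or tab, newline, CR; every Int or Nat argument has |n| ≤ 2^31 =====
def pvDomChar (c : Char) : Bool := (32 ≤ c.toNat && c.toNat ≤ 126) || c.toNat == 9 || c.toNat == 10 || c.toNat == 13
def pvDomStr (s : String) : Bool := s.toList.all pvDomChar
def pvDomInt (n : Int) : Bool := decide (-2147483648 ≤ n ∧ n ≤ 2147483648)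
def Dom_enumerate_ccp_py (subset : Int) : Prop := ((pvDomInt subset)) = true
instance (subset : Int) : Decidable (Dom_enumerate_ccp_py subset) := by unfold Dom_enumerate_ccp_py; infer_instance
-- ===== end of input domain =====

-- B replaces A's (sub-1)&s decrement walk by an explicit bit table plus a recursive
-- submask generator (same values, same order); objective: alternative decomposition.


-- ===== PORT A =====
-- the while loop of A; fuel only makes the recursion total (subset.toNat + 1 always suffices)
def pvLoopA (subset s : Int) : Nat → Int → List (Int × Int) → List (Int × Int)
  | 0, _, pairs => pairs
  | fuel + 1, sub, pairs =>
    if 0 < sub then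
      let comp := Int.xor subset sub        -- complement = subset ^ sub
      pvLoopA subset s fuel (Int.land (sub - 1) s)   -- sub = (sub - 1) & s
        (if 0 < comp ∧ sub < comp then pairs ++ [(sub, comp)] else pairs)
    else pairs

def enumerate_ccp_py (subset : Int) : List (Int × Int) :=
  pvLoopA subset subset (subset.toNat + 1) (Int.land (subset - 1) subset) []

-- ===== PORT B =====
-- bits of subset, ascending: while v <= subset: if subset & v: bits.append(v); v *= 2
-- (the 0 < v conjunct is only a totality guard; v starts at 1 and doubles)
def pvScan (subset v : Int) : List Int :=
  if 0 < v ∧ v ≤ subset then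
    (if Int.land subset v ≠ 0 then [v] else []) ++ pvScan subset (2 * v)
  else []
termination_by (subset + 1 - v).toNat
decreasing_by omega

-- gen(bs): all submasks over the bit values bs, decreasing numeric order
def pvGen (bs : List Int) : List Int :=
  match bs with
  | [] => [0]
  | b :: rest =>
    let t := pvGen rest
    t.map (fun x => b + x) ++ t

def enumerate_ccp_py_alt (subset : Int) : List (Int × Int) :=
  (pvGen (pvScan subset 1).reverse).foldl (fun pairs sub =>
    let comp := Int.xor subset sub
    if 0 < sub ∧ sub < comp then pairs ++ [(sub, comp)] else pairs) []

-- ===== PRECONDITION & SPEC =====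
def Spec_enumerate_ccp_py (subset : Int) (out : List (Int × Int)) : Prop := out = enumerate_ccp_py_alt subset
instance (subset : Int) (out : List (Int × Int)) : Decidable (Spec_enumerate_ccp_py subset out) := by unfold Spec_enumerate_ccp_py; infer_instance

-- ===== CLAIM (what is proved, stated in full; the proofs are below) =====
def Claim_equal_enumerate_ccp_py : Prop := ∀ (subset : Int), Dom_enumerate_ccp_py subset → Spec_enumerate_ccp_py subset (enumerate_ccp_py subset)

-- ===== LEMMAS AND PROOFS =====

-- Nat-level model of A's walk: the successive values of sub, while positive
def nchain (s x : Nat) : List Nat :=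
  if 0 < x then x :: nchain s ((x - 1) &&& s) else []
termination_by x
decreasing_by have := @Nat.and_le_left (x - 1) s; omega

-- Nat-level model of B's generator and scan
def ngen (bs : List Nat) : List Nat :=
  match bs with
  | [] => [0]
  | b :: rest => (ngen rest).map (fun x => b + x) ++ ngen rest

def nscan (s v : Nat) : List Nat :=
  if 0 < v ∧ v ≤ s then (if s &&& v ≠ 0 then [v] else []) ++ nscan s (2 * v) else []
termination_by s + 1 - v

-- the common emission function, on Nat submasks
def pvEmit (sN x : Nat) : Option (Int × Int) :=
  if 0 < x ∧ x < sN ^^^ x then some ((x : Int), ((sN ^^^ x : Nat) : Int)) else none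

theorem castLand (a b : Nat) : Int.land (a : Int) (b : Int) = ((a &&& b : Nat) : Int) := by
  simp [Int.land]

theorem castXor (a b : Nat) : Int.xor (a : Int) (b : Int) = ((a ^^^ b : Nat) : Int) := by
  simp [Int.xor]

theorem lor_eq_add (a : Nat) : ∀ b : Nat, a &&& b = 0 → a ||| b = a + b := by
  induction a using Nat.binaryRec with
  | zero => intro b _; simp
  | bit c n ih =>
    intro b h
    induction b using Nat.binaryRec with
    | zero => simp
    | bit d m _ =>
      rw [Nat.land_bit] at h
      rw [Nat.lor_bit]
      have hb : Nat.bit (c && d) (n &&& m) = 0 := h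
      rw [Nat.bit_eq_zero_iff] at hb
      obtain ⟨h1, h2⟩ := hb
      have := ih m h1
      rcases c with _ | _ <;> rcases d with _ | _ <;> simp_all [Nat.bit] <;> omega

theorem and_two_pow_eq_zero {u b : Nat} (h : u < 2 ^ b) : u &&& 2 ^ b = 0 := by
  apply Nat.eq_of_testBit_eq; intro i
  rcases eq_or_ne i b with rfl | hne
  · simp [Nat.testBit_and, Nat.testBit_lt_two_pow h]
  · simp [Nat.testBit_and, Nat.testBit_two_pow, hne.symm]

theorem two_pow_add_eq_or {u b : Nat} (h : u < 2 ^ b) : 2 ^ b + u = 2 ^ b ||| u := by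
  rw [lor_eq_add]
  · rw [Nat.land_comm]; exact and_two_pow_eq_zero h

-- L1: AND of two values sharing the top bit
theorem land_top {b u v : Nat} (hu : u < 2 ^ b) (hv : v < 2 ^ b) :
    (2 ^ b + u) &&& (2 ^ b + v) = 2 ^ b + (u &&& v) := by
  have hav : u &&& v < 2 ^ b := lt_of_le_of_lt (@Nat.and_le_left u v) hu
  rw [two_pow_add_eq_or hu, two_pow_add_eq_or hv, two_pow_add_eq_or hav]
  apply Nat.eq_of_testBit_eq; intro i
  simp only [Nat.testBit_or, Nat.testBit_and]
  cases Nat.testBit (2 ^ b) i <;> cases Nat.testBit u i <;> cases Nat.testBit v i <;> simp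

-- STEP-LOW: a value below the top bit ANDs with s as with s'
theorem land_low {b u s' : Nat} (hu : u < 2 ^ b) (hs : s' < 2 ^ b) :
    u &&& (2 ^ b + s') = u &&& s' := by
  rw [two_pow_add_eq_or hs, Nat.and_or_distrib_left, and_two_pow_eq_zero hu, Nat.zero_or]

-- STEP-ZERO: (2^b - 1) & (2^b + s') = s'
theorem land_pred_pow {b s' : Nat} (hs : s' < 2 ^ b) :
    (2 ^ b - 1) &&& (2 ^ b + s') = s' := by
  have hp : (0:Nat) < 2 ^ b := by positivity
  have h1 : (2 ^ b - 1 : Nat) < 2 ^ b := by omega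
  rw [land_low h1 hs, Nat.land_comm, Nat.and_two_pow_sub_one_eq_mod, Nat.mod_eq_of_lt hs]

theorem submask_le {x s : Nat} (h : x &&& s = x) : x ≤ s := by
  conv_lhs => rw [← h]
  exact Nat.and_le_right

theorem submask_step {x s : Nat} : ((x - 1) &&& s) &&& s = (x - 1) &&& s := by
  rw [Nat.land_assoc, Nat.and_self]

-- chain under s of a submask of s' equals the chain under s'
theorem nchain_low {b s' : Nat} (hs : s' < 2 ^ b) :
    ∀ x, x &&& s' = x → nchain (2 ^ b + s') x = nchain s' x := by
  intro x
  induction x using Nat.strong_induction_on with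
  | _ x ih =>
    intro hx
    conv_lhs => rw [nchain]
    conv_rhs => rw [nchain]
    by_cases h0 : 0 < x
    · simp only [h0, if_true]
      have hxe : x - 1 < 2 ^ b := by have := submask_le hx; omega
      rw [land_low hxe hs]
      congr 1
      exact ih ((x - 1) &&& s') (by have := @Nat.and_le_left (x - 1) s'; omega) submask_step
    · simp [h0]

-- HI: the chain from 2^b + x splits into the lifted chain of x and the chain of s'
theorem nchain_high {b s' : Nat} (hs : s' < 2 ^ b) :
    ∀ x, x &&& s' = x →
      nchain (2 ^ b + s') (2 ^ b + x)
        = (nchain s' x).map (fun t => 2 ^ b + t) ++ 2 ^ b :: nchain s' s' := by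
  intro x
  induction x using Nat.strong_induction_on with
  | _ x ih =>
    intro hx
    have hxb : x < 2 ^ b := lt_of_le_of_lt (submask_le hx) hs
    by_cases h0 : 0 < x
    · conv_lhs => rw [nchain]
      have hp : 0 < 2 ^ b + x := by positivity
      simp only [hp, if_true]
      have hstep : (2 ^ b + x - 1) &&& (2 ^ b + s') = 2 ^ b + ((x - 1) &&& s') := by
        have he : 2 ^ b + x - 1 = 2 ^ b + (x - 1) := by omega
        rw [he, land_top (by omega) hs]
      rw [hstep,
        ih ((x - 1) &&& s') (by have := @Nat.and_le_left (x - 1) s'; omega) submask_step]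
      conv_rhs => rw [nchain]
      simp only [h0, if_true]
      simp
    · have hx0 : x = 0 := by omega
      subst hx0
      conv_lhs => rw [nchain]
      have hp : (0:Nat) < 2 ^ b + 0 := by positivity
      simp only [hp, if_true]
      have hz : (2 ^ b + 0 - 1) &&& (2 ^ b + s') = s' := by
        simpa using land_pred_pow hs
      rw [hz, nchain_low hs s' (Nat.and_self s')]
      conv_rhs => rw [nchain]
      simp

-- SCAN: the bit scan of s = 2^b + s' (b the top bit) is the scan of s' followed by 2^b
theorem nscan_split {b s' : Nat} (hs : s' < 2 ^ b) :
    ∀ j, j ≤ b → nscan (2 ^ b + s') (2 ^ j) = nscan s' (2 ^ j) ++ [2 ^ b] := by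
  intro j hj
  induction hk : b - j generalizing j with
  | zero =>
    have hjb : j = b := by omega
    subst hjb
    conv_lhs => rw [nscan]
    have hpos : (0:Nat) < 2 ^ j := by positivity
    have h1 : 0 < 2 ^ j ∧ 2 ^ j ≤ 2 ^ j + s' := ⟨hpos, by omega⟩
    rw [if_pos h1]
    have hhit : (2 ^ j + s') &&& 2 ^ j = 2 ^ j := by
      rw [two_pow_add_eq_or hs, Nat.land_comm, Nat.and_or_distrib_left,
        Nat.and_self, Nat.land_comm (2 ^ j) s', and_two_pow_eq_zero hs]
      simp
    rw [hhit, if_pos (show (2:Nat) ^ j ≠ 0 by positivity)]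
    have htail : nscan (2 ^ j + s') (2 * 2 ^ j) = [] := by
      rw [nscan, if_neg (by omega)]
    have hrhs : nscan s' (2 ^ j) = [] := by
      rw [nscan, if_neg (by omega)]
    rw [htail, hrhs]
    simp
  | succ k ihk =>
    have hjb : j < b := by omega
    have hjle : (2:Nat) ^ j ≤ 2 ^ b := Nat.pow_le_pow_right (by norm_num) (by omega)
    have hjlt : (2:Nat) ^ j < 2 ^ b := Nat.pow_lt_pow_right (by norm_num) (by omega)
    have hpos : (0:Nat) < 2 ^ j := by positivity
    conv_lhs => rw [nscan]
    rw [if_pos ⟨hpos, by omega⟩]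
    have hhit : (2 ^ b + s') &&& 2 ^ j = s' &&& 2 ^ j := by
      rw [two_pow_add_eq_or hs, Nat.land_comm, Nat.and_or_distrib_left,
        and_two_pow_eq_zero hjlt, Nat.land_comm (2 ^ j) s']
      simp
    have h2j : 2 * 2 ^ j = 2 ^ (j + 1) := by ring
    rw [hhit, h2j, ihk (j + 1) (by omega) (by omega)]
    by_cases hc : 2 ^ j ≤ s'
    · conv_rhs => rw [nscan]
      rw [if_pos (show 0 < 2 ^ j ∧ 2 ^ j ≤ s' from ⟨hpos, hc⟩), h2j]
      simp
    · have hrz : nscan s' (2 ^ j) = [] := by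
        rw [nscan, if_neg (by omega)]
      have hz : s' &&& 2 ^ j = 0 := and_two_pow_eq_zero (by omega)
      have hr2 : nscan s' (2 ^ (j + 1)) = [] := by
        rw [nscan, if_neg (by omega)]
      rw [hrz, hz, hr2]
      simp

-- MAIN: the generator over the reversed scan lists s's submasks in A's walk order, then 0
theorem main_eq : ∀ s : Nat, ngen (nscan s 1).reverse = nchain s s ++ [0] := by
  intro s
  induction s using Nat.strong_induction_on with
  | _ s ih =>
    by_cases h0 : 0 < s
    · have h2b : 2 ^ Nat.log2 s ≤ s := Nat.log2_self_le (by omega)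
      have hlt : s < 2 ^ (Nat.log2 s + 1) := Nat.lt_log2_self
      have hp : (2:Nat) ^ (Nat.log2 s + 1) = 2 * 2 ^ Nat.log2 s := by ring
      have hs : s - 2 ^ Nat.log2 s < 2 ^ Nat.log2 s := by omega
      have hsplit : s = 2 ^ Nat.log2 s + (s - 2 ^ Nat.log2 s) := by omega
      have hscan : nscan s 1 = nscan (s - 2 ^ Nat.log2 s) 1 ++ [2 ^ Nat.log2 s] := by
        conv_lhs => rw [hsplit]
        have := nscan_split hs 0 (Nat.zero_le _)
        simpa using this
      have hchain : nchain s s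
          = (nchain (s - 2 ^ Nat.log2 s) (s - 2 ^ Nat.log2 s)).map
              (fun t => 2 ^ Nat.log2 s + t)
            ++ 2 ^ Nat.log2 s :: nchain (s - 2 ^ Nat.log2 s) (s - 2 ^ Nat.log2 s) := by
        conv_lhs => rw [hsplit]
        exact nchain_high hs _ (Nat.and_self _)
      rw [hscan, hchain]
      have hrec : s - 2 ^ Nat.log2 s < s := by
        have : (0:Nat) < 2 ^ Nat.log2 s := by positivity
        omega
      have hih := ih _ hrec
      simp only [List.reverse_append, List.reverse_cons, List.reverse_nil,
        List.nil_append, List.cons_append, ngen]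
      rw [hih]
      simp
    · have hz : s = 0 := by omega
      subst hz
      conv_lhs => rw [nscan]
      conv_rhs => rw [nchain]
      simp [ngen]

-- BRIDGE A: the Int while-loop is the Nat chain filtered through pvEmit
theorem bridgeA (sN : Nat) :
    ∀ (fuel x : Nat) (acc : List (Int × Int)), x &&& sN = x → x < fuel →
      pvLoopA (sN : Int) (sN : Int) fuel (x : Int) acc
        = acc ++ (nchain sN x).filterMap (pvEmit sN) := by
  intro fuel
  induction fuel with
  | zero => intro x acc _ h; omega
  | succ fuel ih =>
    intro x acc hsub hlt
    by_cases h0 : 0 < x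
    · have hpos : (0:Int) < (x : Int) := by exact_mod_cast h0
      have hc1 : ((x : Int) - 1) = ((x - 1 : Nat) : Int) := by push_cast [h0]; omega
      have hland : Int.land ((x : Int) - 1) (sN : Int) = (((x - 1) &&& sN : Nat) : Int) := by
        rw [hc1, castLand]
      have hguard : ((0:Int) < Int.xor (sN : Int) (x : Int) ∧ (x : Int) < Int.xor (sN : Int) (x : Int))
          ↔ (0 < x ∧ x < sN ^^^ x) := by
        rw [castXor]
        constructor
        · intro ⟨a, b⟩; exact ⟨h0, by exact_mod_cast b⟩
        · intro ⟨a, b⟩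
          have hb : (x : Int) < ((sN ^^^ x : Nat) : Int) := by exact_mod_cast b
          exact ⟨lt_trans (by exact_mod_cast h0) hb, hb⟩
      have hnext : ((x - 1) &&& sN) < fuel := by
        have := @Nat.and_le_left (x - 1) sN; omega
      conv_rhs => rw [nchain]
      rw [if_pos h0]
      simp only [pvLoopA, if_pos hpos, hland]
      rw [ih ((x - 1) &&& sN) _ submask_step hnext]
      by_cases hg : 0 < x ∧ x < sN ^^^ x
      · rw [if_pos (hguard.mpr hg)]
        simp [List.filterMap_cons, pvEmit, hg, castXor]
      · rw [if_neg (fun hc => hg (hguard.mp hc))]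
        simp [List.filterMap_cons, pvEmit, hg]
    · have hx0 : x = 0 := by omega
      subst hx0
      simp only [pvLoopA, Nat.cast_zero]
      rw [if_neg (by omega)]
      conv_rhs => rw [nchain]
      simp

-- BRIDGE B: the Int bit scan is the Nat bit scan, cast
theorem scan_cast (s : Nat) :
    ∀ (k v : Nat), s + 1 - v = k →
      pvScan (s : Int) (v : Int) = (nscan s v).map Int.ofNat := by
  intro k
  induction k using Nat.strong_induction_on with
  | _ k ih =>
    intro v hk
    conv_lhs => rw [pvScan]
    conv_rhs => rw [nscan]
    by_cases hc : 0 < v ∧ v ≤ s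
    · have hcI : (0:Int) < (v : Int) ∧ (v : Int) ≤ (s : Int) := by
        exact ⟨by exact_mod_cast hc.1, by exact_mod_cast hc.2⟩
      rw [if_pos hcI, if_pos hc]
      have h2 : (2 * (v : Int)) = ((2 * v : Nat) : Int) := by push_cast; ring
      have hrec : pvScan (s : Int) ((2 * v : Nat) : Int)
          = (nscan s (2 * v)).map Int.ofNat :=
        ih (s + 1 - 2 * v) (by omega) (2 * v) rfl
      rw [h2, hrec, castLand]
      have hhit : (((s &&& v : Nat) : Int) ≠ 0) ↔ (s &&& v ≠ 0) := by
        exact_mod_cast Iff.rfl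
      by_cases hh : s &&& v ≠ 0
      · rw [if_pos (hhit.mpr hh), if_pos hh]; simp
      · rw [if_neg (fun hx => hh (hhit.mp hx)), if_neg hh]; simp
    · rw [if_neg (by exact_mod_cast hc), if_neg hc]
      simp

-- BRIDGE B: the Int generator is the Nat generator, cast
theorem gen_cast : ∀ bs : List Nat,
    pvGen (bs.map Int.ofNat) = (ngen bs).map Int.ofNat := by
  intro bs
  induction bs with
  | nil => simp [pvGen, ngen]
  | cons b rest ih =>
    simp only [List.map_cons, pvGen, ngen, ih, List.map_append, List.map_map]
    congr 1

-- BRIDGE B: the fold with conditional append is filterMap pvEmit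
theorem foldl_emit (sN : Nat) :
    ∀ (l : List Nat) (acc : List (Int × Int)),
      (l.map Int.ofNat).foldl (fun pairs sub =>
          let comp := Int.xor (sN : Int) sub
          if 0 < sub ∧ sub < comp then pairs ++ [(sub, comp)] else pairs) acc
        = acc ++ l.filterMap (pvEmit sN) := by
  intro l
  induction l with
  | nil => simp
  | cons x rest ih =>
    intro acc
    rw [List.map_cons, List.foldl_cons, List.filterMap_cons]
    show List.foldl _ (if 0 < (Int.ofNat x) ∧ (Int.ofNat x) < Int.xor (sN : Int) (Int.ofNat x)
        then acc ++ [(Int.ofNat x, Int.xor (sN : Int) (Int.ofNat x))] else acc) _ = _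
    have hco : (Int.ofNat x) = ((x : Nat) : Int) := rfl
    have hguard : ((0:Int) < (x : Int) ∧ (x : Int) < ((sN ^^^ x : Nat) : Int))
        ↔ (0 < x ∧ x < sN ^^^ x) := by
      constructor
      · intro ⟨a, b⟩; exact ⟨by exact_mod_cast a, by exact_mod_cast b⟩
      · intro ⟨a, b⟩; exact ⟨by exact_mod_cast a, by exact_mod_cast b⟩
    rw [hco, castXor]
    by_cases hg : 0 < x ∧ x < sN ^^^ x
    · rw [if_pos (hguard.mpr hg), ih]
      simp [pvEmit, hg]
    · rw [if_neg (fun hc => hg (hguard.mp hc)), ih]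
      simp [pvEmit, hg]

theorem emit_self (sN : Nat) : pvEmit sN sN = none := by
  simp [pvEmit, Nat.xor_self]

theorem emit_zero (sN : Nat) : pvEmit sN 0 = none := by
  simp [pvEmit]

-- both empty-side cases of B
theorem alt_empty (subset : Int) (h : ¬ (1:Int) ≤ subset) : enumerate_ccp_py_alt subset = [] := by
  unfold enumerate_ccp_py_alt
  rw [pvScan, if_neg (by omega)]
  simp [pvGen]

-- ===== VERDICT (by name: the statement is the Claim_ definition above) =====
theorem enumerate_ccp_py_spec : Claim_equal_enumerate_ccp_py := by
  intro subset _
  unfold Spec_enumerate_ccp_py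
  rcases subset with n | m
  · -- subset = ofNat n
    rcases Nat.eq_zero_or_pos n with rfl | hn
    · -- n = 0
      have h00 : (Int.ofNat 0) = (0:Int) := rfl
      rw [h00]
      have hA : enumerate_ccp_py 0 = [] := by
        unfold enumerate_ccp_py
        have h0 : ((0:Int) - 1) = Int.negSucc 0 := rfl
        have h1 : Int.land ((0:Int) - 1) 0 = ((Nat.ldiff 0 0 : Nat) : Int) := by
          rw [h0]; rfl
        rw [h1]
        have h2 : Nat.ldiff 0 0 = 0 := by simp [Nat.ldiff]
        rw [h2]
        simp [pvLoopA]
      rw [hA, alt_empty 0 (by omega)]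
    · -- n > 0
      have hofNat : (Int.ofNat n) = (n : Int) := rfl
      rw [hofNat]
      have hx0 : (n - 1) &&& n &&& n = (n - 1) &&& n := submask_step
      have hlt : (n - 1) &&& n < n + 1 := by
        have := @Nat.and_le_left (n - 1) n; omega
      have hc1 : ((n : Int) - 1) = ((n - 1 : Nat) : Int) := by push_cast [hn]; omega
      have hA : enumerate_ccp_py (n : Int)
          = (nchain n ((n - 1) &&& n)).filterMap (pvEmit n) := by
        unfold enumerate_ccp_py
        rw [hc1, castLand]
        have htn : ((n : Int)).toNat = n := by simp
        rw [htn]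
        exact bridgeA n (n + 1) ((n - 1) &&& n) [] hx0 hlt
      have hB : enumerate_ccp_py_alt (n : Int)
          = (ngen (nscan n 1).reverse).filterMap (pvEmit n) := by
        unfold enumerate_ccp_py_alt
        have h1 : (1:Int) = ((1:Nat) : Int) := rfl
        rw [h1, scan_cast n (n + 1 - 1) 1 rfl, ← List.map_reverse, gen_cast, foldl_emit]
        simp
      rw [hA, hB, main_eq n]
      have hchain : nchain n n = n :: nchain n ((n - 1) &&& n) := by
        conv_lhs => rw [nchain]
        rw [if_pos hn]
      rw [hchain]
      simp [List.filterMap_append, List.filterMap_cons, emit_self, emit_zero]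
  · -- subset = negSucc m
    have hA : enumerate_ccp_py (Int.negSucc m) = [] := by
      unfold enumerate_ccp_py
      have h1 : Int.negSucc m - 1 = Int.negSucc (m + 1) := by
        simp [Int.negSucc_eq]; ring
      have h2 : Int.land (Int.negSucc (m + 1)) (Int.negSucc m)
          = Int.negSucc ((m + 1) ||| m) := by simp [Int.land]
      have htn : (Int.negSucc m).toNat = 0 := rfl
      rw [h1, h2, htn]
      simp only [pvLoopA]
      rw [if_neg (by omega : ¬ (0:Int) < Int.negSucc ((m + 1) ||| m))]
    have hB : enumerate_ccp_py_alt (Int.negSucc m) = [] :=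
      alt_empty _ (by omega)
    rw [hA, hB]
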